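-- pv_equiv track=rewrite | github.com/RomanEntertainmentSoftwareLLC/Assignment2 | assignment2.py | checkGoodString
-- ===== SOURCE A (Python) =====
-- def checkGoodString(string:str):
--
--     hasDigit = False
--
--     for chr in string:
--         if chr.isdigit():
--             hasDigit = True
--         else:
--             hasDigit = False
--
--     if(len(string) >= 9 and string[0].islower() and hasDigit):
--         return True
--     else:
--         return False
-- ===== SOURCE B (Python) =====
-- def checkGoodString(string: str):
--     return len(string) >= 9 and string[0].islower() and string[-1].isdigit()
-- ===== Notes on version B (the rewrite author's own statement) =====
-- stated objective: simpler
-- what changed: Replaced the flag-resetting loop over all characters (whose flag ends up equal to the last character's digit status) with a single short-circuited boolean expression testing length, first character and last character.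
import Mathlib
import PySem

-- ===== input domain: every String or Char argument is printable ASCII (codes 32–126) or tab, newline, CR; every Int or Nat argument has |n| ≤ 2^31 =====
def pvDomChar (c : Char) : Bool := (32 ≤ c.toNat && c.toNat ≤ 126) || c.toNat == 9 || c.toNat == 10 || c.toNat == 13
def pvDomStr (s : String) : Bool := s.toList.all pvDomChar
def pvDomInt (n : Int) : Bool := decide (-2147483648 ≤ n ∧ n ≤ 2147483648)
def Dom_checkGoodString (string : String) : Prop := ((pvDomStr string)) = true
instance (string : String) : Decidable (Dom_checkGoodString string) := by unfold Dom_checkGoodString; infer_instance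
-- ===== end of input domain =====

-- ===== PORT A =====
-- A's loop resets hasDigit on every char, so it ends as the last char's digit status.
def checkGoodString (string : String) : Bool :=
  let hasDigit := string.toList.foldl (fun _hd c => if PySem.Chars.isdigit c then true else false) false
  if decide (9 ≤ PySem.Str.len string) && (PySem.Str.pyGet? string 0).any PySem.Chars.islower && hasDigit then
    true
  else
    false

-- ===== PORT B =====
-- B: one short-circuited boolean expression; && only inspects string[0]/string[-1] when needed.
def checkGoodString_alt (string : String) : Bool :=
  decide (9 ≤ PySem.Str.len string) &&
    (PySem.Str.pyGet? string 0).any PySem.Chars.islower &&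
    (PySem.Str.pyGet? string (-1)).any PySem.Chars.isdigit

-- ===== PRECONDITION & SPEC =====
def Spec_checkGoodString (string : String) (out : Bool) : Prop := out = checkGoodString_alt string
instance (string : String) (out : Bool) : Decidable (Spec_checkGoodString string out) := by unfold Spec_checkGoodString; infer_instance

-- ===== CLAIM (what is proved, stated in full; the proofs are below) =====
def Claim_equal_checkGoodString : Prop := ∀ (string : String), Dom_checkGoodString string → Spec_checkGoodString string (checkGoodString string)

-- ===== LEMMAS AND PROOFS =====

-- ===== VERDICT (by name: the statement is the Claim_ definition above) =====
lemma foldl_lastFlag (x : Char) (xs : List Char) (b : Bool) :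
    (x :: xs).foldl (fun _hd c => if PySem.Chars.isdigit c then true else false) b
      = ((x :: xs).getLast?).any PySem.Chars.isdigit := by
  induction xs generalizing x b with
  | nil => cases h : PySem.Chars.isdigit x <;> simp [h]
  | cons y ys ih => simpa using ih y (if PySem.Chars.isdigit x then true else false)

lemma hasDigit_eq (xs : List Char) :
    xs.foldl (fun _hd c => if PySem.Chars.isdigit c then true else false) false
      = (xs.getLast?).any PySem.Chars.isdigit := by
  cases xs with
  | nil => rfl
  | cons x xs => exact foldl_lastFlag x xs false

theorem checkGoodString_spec : Claim_equal_checkGoodString := by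
  intro s _
  unfold Spec_checkGoodString checkGoodString checkGoodString_alt
  rw [hasDigit_eq]
  have : PySem.Str.pyGet? s (-1) = s.toList.getLast? := by
    simp [PySem.Str.pyGet?, PySem.List.pyGet?_neg_one]
  rw [this]
  cases h9 : decide (9 ≤ PySem.Str.len s) <;>
  cases hl : (PySem.Str.pyGet? s 0).any PySem.Chars.islower <;>
  cases hd : (s.toList.getLast?).any PySem.Chars.isdigit <;> simp_all
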